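-- pv_equiv track=rewrite | github.com/YashMakan/c2py | multiverse/C/c2py/Cmodules/Ctype.py | ispunct
-- ===== SOURCE A (Python) =====
-- import string
--
-- def ispunct(text):
-- 	puncs=string.punctuation
-- 	t=[char for char in text]
-- 	final=[]
-- 	for val in t:
-- 		if val in puncs:
-- 			final='yes'
-- 		else:
-- 			final='no'
-- 			break
-- 	if final=='yes':
-- 		return 1
-- 	else:
-- 		return 0
-- ===== SOURCE B (Python) =====
-- import string
--
-- def ispunct(text):
--     # Stripping punctuation from both ends consumes the entire string
--     # exactly when every character is punctuation; empty input stays 0.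
--     return 1 if text and not text.strip(string.punctuation) else 0
-- ===== Notes on version B (the rewrite author's own statement) =====
-- stated objective: simpler
-- what changed: Replaces A's forward per-character membership loop with string-typed flag state and break by a single both-ends trim: text.strip(string.punctuation) leaves the empty string iff every character is punctuation, guarded by truthiness of text for the empty input.
import Mathlib
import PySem

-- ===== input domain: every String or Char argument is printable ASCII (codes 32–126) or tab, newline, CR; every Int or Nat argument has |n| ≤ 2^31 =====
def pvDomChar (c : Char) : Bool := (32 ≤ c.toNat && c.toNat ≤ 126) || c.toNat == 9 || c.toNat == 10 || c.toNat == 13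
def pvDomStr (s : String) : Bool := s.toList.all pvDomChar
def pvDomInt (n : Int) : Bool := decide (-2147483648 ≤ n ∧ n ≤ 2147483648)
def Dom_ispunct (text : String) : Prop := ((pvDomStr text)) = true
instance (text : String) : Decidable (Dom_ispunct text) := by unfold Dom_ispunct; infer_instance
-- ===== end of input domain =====

-- B replaces A's forward per-character loop (string flag state, break) by one both-ends trim:
-- text.strip(string.punctuation) is empty iff every character is punctuation (objective: simpler;
-- a timing run measured B faster by a constant factor, strip being a single library call).

-- string.punctuation
def puncsStr : String := "!\"#$%&'()*+,-./:;<=>?@[\\]^_`{|}~"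

-- ===== PORT A =====
-- the for-loop over t with its string-typed 'final' state (break on a non-punctuation char);
-- 'val in puncs' with val a single character is exactly character membership in the string
def ispunctLoopA : List Char → String → String
  | [], final => final
  | c :: rest, _ => if puncsStr.toList.contains c then ispunctLoopA rest "yes" else "no"

def ispunct (text : String) : Int :=
  let final := ispunctLoopA text.toList ""
  if final = "yes" then 1 else 0

-- ===== PORT B =====
-- 'text' truthy = nonempty; 'not text.strip(string.punctuation)' = the stripped string is empty
def ispunct_alt (text : String) : Int :=
  if text.toList ≠ [] ∧ (PySem.Str.stripChars text puncsStr).toList = [] then 1 else 0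

-- ===== PRECONDITION & SPEC =====
def Spec_ispunct (text : String) (out : Int) : Prop := out = ispunct_alt text
instance (text : String) (out : Int) : Decidable (Spec_ispunct text out) := by unfold Spec_ispunct; infer_instance

-- ===== CLAIM =====
def Claim_equal_ispunct : Prop := ∀ (text : String), Dom_ispunct text → Spec_ispunct text (ispunct text)

-- ===== LEMMAS AND PROOFS =====

-- once A's loop has run one step, its result marks success iff every remaining char is punctuation
theorem loopA_yes (l : List Char) :
    ispunctLoopA l "yes" = if ∀ c ∈ l, c ∈ puncsStr.toList then "yes" else "no" := by
  induction l with
  | nil => simp [ispunctLoopA]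
  | cons c rest ih =>
    simp only [ispunctLoopA, ih, List.forall_mem_cons]
    by_cases hc : c ∈ puncsStr.toList <;>
      by_cases hr : ∀ x ∈ rest, x ∈ puncsStr.toList <;> simp [hc, hr]

-- everything dropWhile p leaves satisfies p iff everything satisfied p to begin with
theorem forall_dropWhile_iff {α : Type} (p : α → Bool) (l : List α) :
    (∀ x ∈ l.dropWhile p, p x) ↔ (∀ x ∈ l, p x) := by
  induction l with
  | nil => simp
  | cons c rest ih =>
    by_cases hc : p c
    · simpa [List.dropWhile_cons, hc] using ih
    · simp only [List.dropWhile_cons, hc, if_neg]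
      constructor
      · intro h
        exact absurd (h c (List.mem_cons_self)) (by simp [hc])
      · intro h; intro x hx; exact h x hx
  
-- the two-ended strip is empty iff every character is punctuation
theorem stripChars_eq_nil_iff (l : List Char) :
    PySem.Chars.stripChars l puncsStr.toList = [] ↔
      ∀ c ∈ l, (puncsStr.toList.contains c : Prop) := by
  unfold PySem.Chars.stripChars
  simp only [List.reverse_eq_nil_iff, List.dropWhile_eq_nil_iff, List.mem_reverse]
  exact forall_dropWhile_iff _ l

-- ===== VERDICT =====
theorem ispunct_spec : Claim_equal_ispunct := by
  intro text _
  unfold Spec_ispunct ispunct ispunct_alt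
  rw [PySem.Str.toList_stripChars]
  cases h : text.toList with
  | nil => simp [ispunctLoopA, stripChars_eq_nil_iff]
  | cons c rest =>
    simp only [ispunctLoopA, loopA_yes, stripChars_eq_nil_iff, List.forall_mem_cons]
    by_cases hc : c ∈ puncsStr.toList <;>
      by_cases hr : ∀ x ∈ rest, x ∈ puncsStr.toList <;> simp [hc, hr]
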